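-- pv_equiv track=rewrite | github.com/matthewninja/cap1-tech-assassment | code_check/__init__.py | has_multi_line_comment_double
-- ===== SOURCE A (Python) =====
-- def has_multi_line_comment_double(line):
--   in_string_double = False
--   escaped = False
--   for i in range(len(line)):
--     if in_string_double: # escaped character doesn't count for anything
--       if line[i] == '\\':
--         escaped = True
--         continue
--     if not escaped and line[i] == "'":
--       in_string_double = not in_string_double
--
--     escaped = False
--     if line[i] == '"' and not in_string_double and i + 2 < len(line):
--       if line[i+1] == '"' and line[i+2] == '"':
--         return True
--   return False
-- ===== SOURCE B (Python) =====
-- def has_multi_line_comment_double(line):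
--     # Pass 1: mask out characters that lie inside a single-quoted string
--     # (same escape state machine as the scanner, but no detection here).
--     in_str = False
--     escaped = False
--     filtered = []
--     for ch in line:
--         if in_str and ch == '\\':
--             filtered.append('x')
--             escaped = True
--             continue
--         if not escaped and ch == "'":
--             in_str = not in_str
--         escaped = False
--         filtered.append('x' if in_str else ch)
--     # Pass 2: a triple quote starting in code shows up verbatim in the mask.
--     return '"""' in ''.join(filtered)
-- ===== Notes on version B (the rewrite author's own statement) =====
-- stated objective: alternative
-- what changed: B splits A's fused scan into two phases: one pass runs the same quote/escape state machine only to build a masked copy of the line (string-interior characters blanked), then detection is a plain substring search for a triple double-quote in the mask.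
import Mathlib
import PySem

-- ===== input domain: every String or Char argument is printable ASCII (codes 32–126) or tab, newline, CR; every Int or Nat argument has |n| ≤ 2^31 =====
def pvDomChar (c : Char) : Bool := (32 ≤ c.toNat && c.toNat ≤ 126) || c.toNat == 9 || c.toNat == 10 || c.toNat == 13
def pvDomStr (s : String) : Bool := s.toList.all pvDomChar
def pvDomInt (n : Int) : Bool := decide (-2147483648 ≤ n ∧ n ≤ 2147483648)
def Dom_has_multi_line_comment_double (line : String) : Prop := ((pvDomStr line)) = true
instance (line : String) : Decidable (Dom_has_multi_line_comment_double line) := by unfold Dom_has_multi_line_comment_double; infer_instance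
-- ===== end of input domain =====

-- B builds a masked copy of the line (string-interior chars blanked) in one pass and
-- then searches it for '"""'; same result as A's fused scan, objective: alternative decomposition.

-- ===== PORT A =====
-- lookahead line[i+1] == '"' and line[i+2] == '"' (with i+2 < len)
def aLook2 : List Char → Bool
  | a :: b :: _ => a == '"' && b == '"'
  | _ => false

-- the scanning loop of A, with early return on detection
def aGo : List Char → Bool → Bool → Bool
  | [], _, _ => false
  | c :: rest, inStr, escaped =>
    if inStr && c == '\\' then aGo rest inStr true
    else
      let inStr' := if !escaped && c == '\'' then !inStr else inStr
      if c == '"' && !inStr' && aLook2 rest then true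
      else aGo rest inStr' false

def has_multi_line_comment_double (line : String) : Bool := aGo line.toList false false

-- ===== PORT B =====
-- pass 1: same state machine, but only builds the masked line
def bFilter : List Char → Bool → Bool → List Char
  | [], _, _ => []
  | c :: rest, inStr, escaped =>
    if inStr && c == '\\' then 'x' :: bFilter rest inStr true
    else
      let inStr' := if !escaped && c == '\'' then !inStr else inStr
      (if inStr' then 'x' else c) :: bFilter rest inStr' false

-- pass 2: Python's '"""' in s (substring search)
def bHasTriple : List Char → Bool
  | a :: b :: c :: rest => if a == '"' && b == '"' && c == '"' then true else bHasTriple (b :: c :: rest)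
  | _ => false

def has_multi_line_comment_double_alt (line : String) : Bool :=
  bHasTriple (bFilter line.toList false false)

-- ===== PRECONDITION & SPEC =====
def Spec_has_multi_line_comment_double (line : String) (out : Bool) : Prop := out = has_multi_line_comment_double_alt line
instance (line : String) (out : Bool) : Decidable (Spec_has_multi_line_comment_double line out) := by unfold Spec_has_multi_line_comment_double; infer_instance

-- ===== CLAIM (what is proved, stated in full; the proofs are below) =====
def Claim_equal_has_multi_line_comment_double : Prop := ∀ (line : String), Dom_has_multi_line_comment_double line → Spec_has_multi_line_comment_double line (has_multi_line_comment_double line)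

-- ===== LEMMAS AND PROOFS =====

-- dropping a non-quote head does not change the substring search
lemma bHasTriple_cons_ne (c : Char) (L : List Char) (h : (c == '"') = false) :
    bHasTriple (c :: L) = bHasTriple L := by
  match L with
  | [] => simp [bHasTriple]
  | [a] => simp [bHasTriple]
  | a :: b :: t => simp [bHasTriple, h]

-- a quote head followed by a non-quote can be dropped too
lemma bHasTriple_quote_ne (b : Char) (L : List Char) (h : (b == '"') = false) :
    bHasTriple ('"' :: b :: L) = bHasTriple (b :: L) := by
  match L with
  | [] => simp [bHasTriple]
  | z :: t => simp [bHasTriple, h]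

lemma bHasTriple_qq_ne (e : Char) (L : List Char) (he : (e == '"') = false) :
    bHasTriple ('"' :: '"' :: e :: L) = bHasTriple ('"' :: e :: L) := by
  simp [bHasTriple, he]

-- one unfolding step of the mask builder from the code state
lemma bFilter_cons_false (c : Char) (t : List Char) :
    bFilter (c :: t) false false =
      (if (c == '\'') = true then 'x' else c) :: bFilter t (c == '\'') false := by
  cases hc : (c == '\'') with
  | true => simp [bFilter, hc]
  | false => simp [bFilter, hc]

-- prepending a code-position quote whose two raw successors are not both quotes
-- does not change the substring search of the mask
lemma quote_prepend (rest : List Char) (hlk : aLook2 rest = false) :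
    bHasTriple ('"' :: bFilter rest false false) = bHasTriple (bFilter rest false false) := by
  match rest with
  | [] => simp [bFilter, bHasTriple]
  | a :: t =>
    rw [bFilter_cons_false]
    by_cases ha : (a == '"') = true
    · have ha' : a = '"' := by simpa using ha
      subst ha'
      rw [if_neg (by decide), show ('"' == '\'') = false from by decide]
      match t with
      | [] => simp [bHasTriple, bFilter]
      | b :: t' =>
        have hb : (b == '"') = false := by
          cases hbb : (b == '"') with
          | false => rfl
          | true =>
            exfalso
            have hb' : b = '"' := by simpa using hbb
            subst hb'
            simp [aLook2] at hlk
        rw [bFilter_cons_false]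
        have he : ((if (b == '\'') = true then 'x' else b) == '"') = false := by
          by_cases h2 : (b == '\'') = true
          · simp [h2]
          · simp only [Bool.not_eq_true] at h2
            simp [h2, hb]
        rw [bHasTriple_qq_ne _ _ he, bHasTriple_quote_ne _ _ he]
    · simp only [Bool.not_eq_true] at ha
      have heq : ((if (a == '\'') = true then 'x' else a) == '"') = false := by
        by_cases h2 : (a == '\'') = true
        · simp [h2]
        · simp only [Bool.not_eq_true] at h2
          simp [h2, ha]
      rw [bHasTriple_quote_ne _ _ heq]

lemma main_equiv (cs : List Char) : ∀ (inStr esc : Bool),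
    aGo cs inStr esc = bHasTriple (bFilter cs inStr esc) := by
  induction cs with
  | nil => intro inStr esc; simp [aGo, bFilter, bHasTriple]
  | cons c rest ih =>
    intro inStr esc
    simp only [aGo, bFilter]
    by_cases h1 : (inStr && c == '\\') = true
    · simp only [if_pos h1]
      rw [bHasTriple_cons_ne _ _ (by decide)]
      exact ih _ _
    · simp only [if_neg h1]
      generalize (if (!esc && c == '\'') = true then !inStr else inStr) = S
      by_cases hdet : (c == '"' && !S && aLook2 rest) = true
      · rw [if_pos hdet]
        have h3 : ((c == '"') = true ∧ (!S) = true) ∧ aLook2 rest = true := by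
          simpa [Bool.and_eq_true] using hdet
        obtain ⟨⟨hc, hns⟩, hlk⟩ := h3
        have hc' : c = '"' := by simpa using hc
        have hns' : S = false := by simpa using hns
        subst hc'; subst hns'
        match rest, hlk with
        | a :: b :: t, hlk =>
          have hab : (a == '"') = true ∧ (b == '"') = true := by
            simpa [aLook2, Bool.and_eq_true] using hlk
          have ha : a = '"' := by simpa using hab.1
          have hb : b = '"' := by simpa using hab.2
          subst ha; subst hb
          rw [if_neg (by decide), bFilter_cons_false,
            show ('"' == '\'') = false from by decide, if_neg (by decide), bFilter_cons_false]
          simp [bHasTriple]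
      · rw [if_neg hdet, ih]
        by_cases hh : ((if S = true then 'x' else c) == '"') = true
        · have hns' : S = false := by
            by_contra hcon
            simp only [Bool.not_eq_false] at hcon
            simp [hcon] at hh
          subst hns'
          have hc' : c = '"' := by simpa using hh
          subst hc'
          have hlk : aLook2 rest = false := by
            by_contra hcon
            simp only [Bool.not_eq_false] at hcon
            simp [hcon] at hdet
          rw [if_neg (by decide)]
          exact (quote_prepend rest hlk).symm
        · simp only [Bool.not_eq_true] at hh
          rw [bHasTriple_cons_ne _ _ hh]

-- ===== VERDICT (by name: the statement is the Claim_ definition above) =====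
theorem has_multi_line_comment_double_spec : Claim_equal_has_multi_line_comment_double := by
  intro line _
  unfold Spec_has_multi_line_comment_double has_multi_line_comment_double has_multi_line_comment_double_alt
  exact main_equiv line.toList false false
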